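-- pv_equiv track=rewrite | github.com/andreshenaov/mi-portafolio | Juego_Ahorcado/Funcionesahorcao.py | cadenapalabra
-- ===== SOURCE A (Python) =====
-- def cadenapalabra(palabrasecre) :
--     '''
--     Función encargada de crear la cantidad de casillas en blanco de la palabra que se mostrarán más adelante en pantalla
--     Argumentos:
--         palabra secreta del juego
--     Entradas:
--         None
--     Salidas por pantalla:
--         None
--     return:
--         cadena de casillas en blanco -> (str)
--     Ejm:
--         palabra secreta = pollo
--         cadenavacia = _ _ _ _ _
--     '''
--     cadenavacia = ""
--     for aux in palabrasecre:
--         if (aux != " "):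
--             cadenavacia += "_ "
--         else:
--             cadenavacia += " "
--     return cadenavacia
-- ===== SOURCE B (Python) =====
-- def cadenapalabra(palabrasecre):
--     return " ".join("_ " * len(w) for w in palabrasecre.split(" "))
-- ===== Notes on version B (the rewrite author's own statement) =====
-- stated objective: idiomatic
-- what changed: Replaces the explicit per-character accumulator loop by split-on-space, string repetition per word, and a join of the pieces.
import Mathlib
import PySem

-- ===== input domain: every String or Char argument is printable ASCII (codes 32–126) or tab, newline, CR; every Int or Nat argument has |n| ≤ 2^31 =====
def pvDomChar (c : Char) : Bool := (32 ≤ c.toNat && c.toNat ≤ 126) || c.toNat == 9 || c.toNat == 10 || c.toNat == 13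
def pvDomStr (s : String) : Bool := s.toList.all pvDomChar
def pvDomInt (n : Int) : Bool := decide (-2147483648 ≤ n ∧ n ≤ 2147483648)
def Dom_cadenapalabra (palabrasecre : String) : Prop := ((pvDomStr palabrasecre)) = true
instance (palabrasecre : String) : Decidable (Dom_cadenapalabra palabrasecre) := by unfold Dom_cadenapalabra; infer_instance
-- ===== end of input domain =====

-- B replaces A's per-character accumulator loop by split-on-space / per-word repetition / join; idiomatic.

-- ===== PORT A =====
-- A: loop over the characters, appending "_ " for a non-space and " " for a space.
def cadenapalabra (palabrasecre : String) : String :=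
  palabrasecre.toList.foldl
    (fun cadenavacia aux => if aux ≠ ' ' then cadenavacia ++ "_ " else cadenavacia ++ " ")
    ""

-- ===== PORT B =====
-- B: " ".join("_ " * len(w) for w in s.split(" ")).
-- pySplitSp is Python's s.split(" ") (explicit single-space separator, empty fields kept).
def pySplitSp : List Char → List (List Char)
  | [] => [[]]
  | c :: rest =>
      match pySplitSp rest with
      | [] => [[c]]
      | w :: ws => if c = ' ' then [] :: w :: ws else (c :: w) :: ws

-- "_ " * n
def underscores : Nat → String
  | 0 => ""
  | n + 1 => "_ " ++ underscores n

-- " ".join(pieces)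
def joinSp : List String → String
  | [] => ""
  | [x] => x
  | x :: xs => x ++ " " ++ joinSp xs

def cadenapalabra_alt (palabrasecre : String) : String :=
  joinSp ((pySplitSp palabrasecre.toList).map (fun w => underscores w.length))

-- ===== PRECONDITION & SPEC =====
def Spec_cadenapalabra (palabrasecre : String) (out : String) : Prop := out = cadenapalabra_alt palabrasecre
instance (palabrasecre : String) (out : String) : Decidable (Spec_cadenapalabra palabrasecre out) := by unfold Spec_cadenapalabra; infer_instance

-- ===== CLAIM (what is proved, stated in full; the proofs are below) =====
def Claim_equal_cadenapalabra : Prop := ∀ (palabrasecre : String), Dom_cadenapalabra palabrasecre → Spec_cadenapalabra palabrasecre (cadenapalabra palabrasecre)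

-- ===== LEMMAS AND PROOFS =====
theorem pySplitSp_ne_nil (l : List Char) : pySplitSp l ≠ [] := by
  cases l with
  | nil => simp [pySplitSp]
  | cons c rest =>
      simp only [pySplitSp]
      cases h : pySplitSp rest with
      | nil => simp
      | cons w ws => by_cases hc : c = ' ' <;> simp [hc]

theorem joinSp_pull (p x : String) (xs : List String) :
    joinSp ((p ++ x) :: xs) = p ++ joinSp (x :: xs) := by
  cases xs with
  | nil => simp [joinSp]
  | cons y ys => simp [joinSp, String.append_assoc]

-- B as a prepend rule: splitting c :: rest contributes exactly A's per-character piece.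
theorem alt_cons (c : Char) (rest : List Char) :
    joinSp ((pySplitSp (c :: rest)).map (fun w => underscores w.length))
      = (if c ≠ ' ' then "_ " else " ") ++ joinSp ((pySplitSp rest).map (fun w => underscores w.length)) := by
  simp only [pySplitSp]
  cases h : pySplitSp rest with
  | nil => exact absurd h (pySplitSp_ne_nil rest)
  | cons w ws =>
      by_cases hc : c = ' '
      · simp [hc, joinSp, underscores]
      · simp only [hc, ne_eq, not_false_iff, if_neg, if_pos]
        simp [List.map_cons, List.length_cons, underscores, joinSp_pull]

theorem fold_eq_alt (l : List Char) (acc : String) :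
    l.foldl (fun cadenavacia aux => if aux ≠ ' ' then cadenavacia ++ "_ " else cadenavacia ++ " ") acc
      = acc ++ joinSp ((pySplitSp l).map (fun w => underscores w.length)) := by
  induction l generalizing acc with
  | nil => simp [pySplitSp, joinSp, underscores]
  | cons c rest ih =>
      simp only [List.foldl_cons, ih, alt_cons]
      by_cases hc : c = ' ' <;> simp [hc, String.append_assoc]

-- ===== VERDICT (by name: the statement is the Claim_ definition above) =====
theorem cadenapalabra_spec : Claim_equal_cadenapalabra := by
  intro s _
  unfold Spec_cadenapalabra cadenapalabra cadenapalabra_alt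
  simpa using fold_eq_alt s.toList ""
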